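-- pv_equiv track=rewrite | github.com/miliar/Code_Jam_Webscraper | solutions_python/Problem_138/943.py | solve
-- ===== SOURCE A (Python) =====
-- def solve(vec):
--     vec_copy = vec.copy()
--
--     unfairN = 0
--     while len(vec_copy) > 0:
--         try:
--             kindex = vec_copy.index('K')
--             nindex = vec_copy.index('N', kindex)
--
--             del vec_copy[nindex]
--             del vec_copy[kindex]
--             unfairN += 1
--         except ValueError as e:
--             break
--
--     fairN = 0
--     kcount = 0
--     for v in reversed(vec):
--         if v == 'K':
--             kcount += 1
--         else:
--             if kcount == 0:
--                 fairN += 1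
--             else:
--                 kcount -= 1
--
--
--
--     # while len(vec_copy) > 0 and not is_sorted(vec_copy):
--     #     del vec_copy[vec_copy.index('N')]
--     #     del vec_copy[len(vec_copy)-1-list(reversed(vec_copy)).index('K')]
--     #
--     # unfairN = len(vec_copy) // 2
--
--     # unfairN = index = len(vec) // 2
--     # while index < len(vec) and vec_copy[index] == 'N':
--     #     unfairN -= 1
--     #     index += 1
--     return unfairN, fairN
-- ===== SOURCE B (Python) =====
-- def solve(vec):
--     # One forward pass (alternative to the index/delete loop + reversed scan): greedy-match each 'N' with an earlier unmatched 'K' (unfair),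
--     # and greedy-match each 'K' with an earlier unmatched non-'K' (pending = fair).
--     avail_k = 0   # 'K's seen and not yet consumed by an 'N'
--     unfair = 0
--     pending = 0   # non-'K' elements not yet matched by a later 'K'
--     for v in vec:
--         if v == 'K':
--             avail_k += 1
--             if pending > 0:
--                 pending -= 1
--         else:
--             pending += 1
--             if v == 'N' and avail_k > 0:
--                 avail_k -= 1
--                 unfair += 1
--     return unfair, pending
-- ===== Notes on version B (the rewrite author's own statement) =====
-- stated objective: alternative
-- what changed: Replaced A's repeated index('K')/index('N')/del loop over a shrinking copy plus a separate reversed scan by a single forward pass that tracks unmatched-K and unmatched-non-K counters.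
import Mathlib
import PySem

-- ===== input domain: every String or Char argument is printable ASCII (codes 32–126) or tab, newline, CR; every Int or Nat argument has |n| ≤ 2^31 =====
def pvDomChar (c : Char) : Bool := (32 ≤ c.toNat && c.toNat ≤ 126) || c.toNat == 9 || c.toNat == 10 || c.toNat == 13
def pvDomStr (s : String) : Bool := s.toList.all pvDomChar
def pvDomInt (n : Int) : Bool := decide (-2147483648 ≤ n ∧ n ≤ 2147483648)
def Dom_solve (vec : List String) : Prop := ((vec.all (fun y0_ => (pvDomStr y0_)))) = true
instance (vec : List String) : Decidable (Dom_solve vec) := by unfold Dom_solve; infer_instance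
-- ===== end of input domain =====

-- B replaces A's repeated index/delete loop and separate reversed scan by one
-- forward pass tracking unmatched counts; same return value everywhere (alternative).

-- ===== PORT A =====
-- the while-loop: find first 'K', first 'N' after it, delete both, count; stop when either is absent
-- (Python's list.index(v, start) is ported exactly as start + first index of v in `drop start`)
def solveLoopA (l : List String) : Int :=
  if _h : 0 < l.length then
    match hk : PySem.List.index? l "K" with
    | none => 0
    | some ki =>
      match hn : PySem.List.index? (l.drop ki) "N" with
      | none => 0
      | some off =>
        1 + solveLoopA ((l.eraseIdx (ki + off)).eraseIdx ki)
  else 0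
termination_by l.length
decreasing_by
  have hki : ki < l.length := by
    have := (PySem.List.index?_eq_some_iff _ _ _).mp hk
    obtain ⟨pre, suf, hpre, hlen, _⟩ := this
    simp [hpre, ← hlen]
  have hoff : off < (l.drop ki).length := by
    have := (PySem.List.index?_eq_some_iff _ _ _).mp hn
    obtain ⟨pre, suf, hpre, hlen, _⟩ := this
    simp [hpre, ← hlen]
  have h1 : (l.eraseIdx (ki + off)).length = l.length - 1 := by
    rw [List.length_eraseIdx_of_lt]; simp at hoff; omega
  have h2 : ((l.eraseIdx (ki + off)).eraseIdx ki).length ≤ (l.eraseIdx (ki + off)).length :=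
    List.length_eraseIdx_le _ _
  omega

-- the reversed for-loop: state = (fairN, kcount)
def solveFairStep (st : Int × Int) (v : String) : Int × Int :=
  if v = "K" then (st.1, st.2 + 1)
  else if st.2 = 0 then (st.1 + 1, st.2)
  else (st.1, st.2 - 1)

def solve (vec : List String) : Int × Int :=
  (solveLoopA vec, (vec.reverse.foldl solveFairStep (0, 0)).1)

-- ===== PORT B =====
-- one forward pass; state = (avail_k, unfair, pending)
def solveAltStep (st : Int × Int × Int) (v : String) : Int × Int × Int :=
  if v = "K" then (st.1 + 1, st.2.1, if 0 < st.2.2 then st.2.2 - 1 else st.2.2)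
  else if v = "N" ∧ 0 < st.1 then (st.1 - 1, st.2.1 + 1, st.2.2 + 1)
  else (st.1, st.2.1, st.2.2 + 1)

def solve_alt (vec : List String) : Int × Int :=
  let st := vec.foldl solveAltStep (0, 0, 0)
  (st.2.1, st.2.2)

-- ===== PRECONDITION & SPEC =====
def Spec_solve (vec : List String) (out : Int × Int) : Prop := out = solve_alt vec
instance (vec : List String) (out : Int × Int) : Decidable (Spec_solve vec out) := by unfold Spec_solve; infer_instance

-- ===== CLAIM (what is proved, stated in full; the proofs are below) =====
def Claim_equal_solve : Prop := ∀ (vec : List String), Dom_solve vec → Spec_solve vec (solve vec)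

-- ===== LEMMAS AND PROOFS =====

-- unfair matches added by B's fold starting from avail = a
def ucnt (a : Int) : List String → Int
  | [] => 0
  | v :: t => if v = "K" then ucnt (a + 1) t
              else if v = "N" ∧ 0 < a then 1 + ucnt (a - 1) t
              else ucnt a t

-- final avail of B's fold starting from avail = a
def aend (a : Int) : List String → Int
  | [] => a
  | v :: t => if v = "K" then aend (a + 1) t
              else if v = "N" ∧ 0 < a then aend (a - 1) t
              else aend a t

-- final pending of B's fold starting from pending = p
def pcnt (p : Int) : List String → Int
  | [] => p
  | v :: t => if v = "K" then pcnt (if 0 < p then p - 1 else p) t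
              else pcnt (p + 1) t

theorem fold_decomp (l : List String) : ∀ a u p,
    l.foldl solveAltStep (a, u, p) = (aend a l, u + ucnt a l, pcnt p l) := by
  induction l with
  | nil => intro a u p; simp [aend, ucnt, pcnt]
  | cons v t ih =>
    intro a u p
    simp only [List.foldl_cons, solveAltStep, aend, ucnt, pcnt]
    split_ifs with h1 h2 <;> rw [ih] <;> simp <;> ring

theorem solve_alt_eq (vec : List String) : solve_alt vec = (ucnt 0 vec, pcnt 0 vec) := by
  simp [solve_alt, fold_decomp]

theorem ucnt_noK (p : List String) (hp : "K" ∉ p) : ∀ r, ucnt 0 (p ++ r) = ucnt 0 r := by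
  induction p with
  | nil => intro r; simp
  | cons v t ih =>
    intro r
    have hv : v ≠ "K" := fun h => hp (h ▸ List.mem_cons_self)
    have ht : "K" ∉ t := fun h => hp (List.mem_cons_of_mem _ h)
    simp only [List.cons_append, ucnt, hv, if_false]
    have : ¬ (v = "N" ∧ (0:Int) < 0) := by simp
    rw [if_neg this]
    exact ih ht r

theorem ucnt_noN (m : List String) (hm : "N" ∉ m) : ∀ r a,
    ucnt a (m ++ r) = ucnt (a + (m.count "K" : Int)) r := by
  induction m with
  | nil => intro r a; simp
  | cons v t ih =>
    intro r a
    have hv : v ≠ "N" := fun h => hm (h ▸ List.mem_cons_self)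
    have ht : "N" ∉ t := fun h => hm (List.mem_cons_of_mem _ h)
    simp only [List.cons_append, ucnt]
    by_cases hK : v = "K"
    · rw [if_pos hK, ih ht]
      have : (v :: t).count "K" = t.count "K" + 1 := by
        simp [hK]
      rw [this]; push_cast; ring_nf
    · rw [if_neg hK, if_neg (by simp [hv]), ih ht]
      have : (v :: t).count "K" = t.count "K" := by simp [hK]
      rw [this]

theorem ucnt_noN_zero (r : List String) (hr : "N" ∉ r) : ∀ a, ucnt a r = 0 := by
  induction r with
  | nil => intro a; simp [ucnt]
  | cons v t ih =>
    intro a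
    have hv : v ≠ "N" := fun h => hr (h ▸ List.mem_cons_self)
    have ht : "N" ∉ t := fun h => hr (List.mem_cons_of_mem _ h)
    simp only [ucnt]
    split_ifs with h1 h2
    · exact ih ht _
    · exact absurd h2.1 hv
    · exact ih ht _

theorem ucnt_cons_N (a : Int) (s : List String) (ha : 0 < a) :
    ucnt a ("N" :: s) = 1 + ucnt (a - 1) s := by
  simp [ucnt, ha]

theorem eraseIdx_at_len {α : Type} (xs : List α) (y : α) (ys : List α) :
    (xs ++ y :: ys).eraseIdx xs.length = xs ++ ys := by
  induction xs with
  | nil => simp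
  | cons x t ih => simp [ih]

theorem loopA_eq_aux : ∀ n (l : List String), l.length ≤ n → solveLoopA l = ucnt 0 l := by
  intro n
  induction n with
  | zero =>
    intro l hl
    have : l = [] := List.length_eq_zero_iff.mp (Nat.le_zero.mp hl)
    subst this; rw [solveLoopA]; simp [ucnt]
  | succ n ih =>
    intro l hl
    rw [solveLoopA]
    split_ifs with hlen
    · split
      · next hk =>
        have hKl : "K" ∉ l := (PySem.List.index?_eq_none_iff _ _).mp hk
        have h0 : ucnt 0 l = 0 := by simpa using ucnt_noK l hKl []
        omega
      · next ki hk =>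
        obtain ⟨pre, suf, hpre, hplen, hpK⟩ := (PySem.List.index?_eq_some_iff _ _ _).mp hk
        have hdrop : l.drop ki = "K" :: suf := by
          rw [hpre, ← hplen, List.drop_left]
        split
        · next hn =>
          have hnm : "N" ∉ l.drop ki := (PySem.List.index?_eq_none_iff _ _).mp hn
          rw [hdrop] at hnm
          have h0 : ucnt 0 l = 0 := by
            rw [hpre, ucnt_noK pre hpK]
            exact ucnt_noN_zero _ hnm 0
          omega
        · next off hn =>
          rw [hdrop, PySem.List.index?_cons_of_ne suf (show ("K":String) ≠ "N" by decide)] at hn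
          cases hjo : PySem.List.index? suf "N" with
          | none => rw [hjo] at hn; simp at hn
          | some j =>
            rw [hjo] at hn; simp at hn
            obtain ⟨m, s, hsuf, hmlen, hmN⟩ := (PySem.List.index?_eq_some_iff _ _ _).mp hjo
            subst hn
            subst hsuf
            subst hpre
            -- erase at ki + (j+1), then at ki : drops exactly the "K" and that "N"
            have hlen2 : (pre ++ "K" :: m).length = ki + (j + 1) := by
              simp [← hplen, ← hmlen]
              try omega
            have he1 : ((pre ++ "K" :: (m ++ "N" :: s))).eraseIdx (ki + (j + 1))
                = pre ++ "K" :: (m ++ s) := by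
              have : pre ++ "K" :: (m ++ "N" :: s) = (pre ++ "K" :: m) ++ "N" :: s := by simp
              rw [this, ← hlen2, eraseIdx_at_len]; simp
            have he2 : (((pre ++ "K" :: (m ++ "N" :: s))).eraseIdx (ki + (j + 1))).eraseIdx ki
                = pre ++ (m ++ s) := by
              rw [he1, ← hplen, eraseIdx_at_len]
            rw [he2]
            have hsz : (pre ++ (m ++ s)).length ≤ n := by
              simp at hl ⊢; omega
            rw [ih _ hsz]
            have hc : (0 : Int) ≤ (m.count "K" : Int) := by positivity
            -- left side
            have eL1 : ucnt 0 (pre ++ (m ++ s)) = ucnt 0 (m ++ s) := ucnt_noK pre hpK _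
            have eL2 : ucnt 0 (m ++ s) = ucnt (0 + (m.count "K" : Int)) s := ucnt_noN m hmN _ _
            -- right side
            have eR1 : ucnt 0 (pre ++ "K" :: (m ++ "N" :: s)) = ucnt 0 ("K" :: (m ++ "N" :: s)) :=
              ucnt_noK pre hpK _
            have eR2 : ucnt 0 ("K" :: (m ++ "N" :: s)) = ucnt (0 + 1) (m ++ "N" :: s) := by
              simp [ucnt]
            have eR3 : ucnt (0 + 1) (m ++ "N" :: s)
                = ucnt ((0 + 1) + (m.count "K" : Int)) ("N" :: s) := ucnt_noN m hmN _ _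
            have eR4 : ucnt ((0 + 1) + (m.count "K" : Int)) ("N" :: s)
                = 1 + ucnt ((0 + 1) + (m.count "K" : Int) - 1) s :=
              ucnt_cons_N _ _ (by omega)
            have eA : (0:Int) + (m.count "K" : Int) = (0 + 1) + (m.count "K" : Int) - 1 := by ring
            rw [eL1, eL2, eR1, eR2, eR3, eR4, eA]
    · have : l = [] := by
        cases l with
        | nil => rfl
        | cons x t => simp at hlen
      subst this; simp [ucnt]

theorem loopA_eq (l : List String) : solveLoopA l = ucnt 0 l :=
  loopA_eq_aux l.length l le_rfl

theorem fair_pe (l : List String) : ∀ p : Int, 0 ≤ p →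
    0 ≤ (l.reverse.foldl solveFairStep (0, 0)).2 ∧
    pcnt p l = (l.reverse.foldl solveFairStep (0, 0)).1 +
               max (p - (l.reverse.foldl solveFairStep (0, 0)).2) 0 := by
  induction l with
  | nil => intro p hp; simp [pcnt]; omega
  | cons v t ih =>
    intro p hp
    have hstep : (v :: t).reverse.foldl solveFairStep (0, 0) =
        solveFairStep (t.reverse.foldl solveFairStep (0, 0)) v := by
      rw [List.reverse_cons, List.foldl_append]; rfl
    rw [hstep]
    set R := t.reverse.foldl solveFairStep (0, 0) with hR
    simp only [pcnt, solveFairStep]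
    by_cases hv : v = "K"
    · subst hv
      obtain ⟨hk, hpe⟩ := ih (if 0 < p then p - 1 else p) (by split_ifs <;> omega)
      refine ⟨show (0:Int) ≤ R.2 + 1 from by omega, ?_⟩
      show pcnt (if 0 < p then p - 1 else p) t = R.1 + max (p - (R.2 + 1)) 0
      by_cases h0 : 0 < p
      · rw [if_pos h0]; rw [if_pos h0] at hpe; rw [hpe]; omega
      · rw [if_neg h0]; rw [if_neg h0] at hpe; rw [hpe]; omega
    · simp only [if_neg hv]
      obtain ⟨hk, hpe⟩ := ih (p + 1) (by omega)
      by_cases hz : R.2 = 0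
      · simp only [if_pos hz]
        refine ⟨show (0:Int) ≤ R.2 from hk, ?_⟩
        show pcnt (p + 1) t = R.1 + 1 + max (p - R.2) 0
        rw [hpe]; omega
      · simp only [if_neg hz]
        refine ⟨show (0:Int) ≤ R.2 - 1 from by omega, ?_⟩
        show pcnt (p + 1) t = R.1 + max (p - (R.2 - 1)) 0
        rw [hpe]; omega

-- ===== VERDICT (by name: the statement is the Claim_ definition above) =====
theorem solve_spec : Claim_equal_solve := by
  intro vec _
  unfold Spec_solve
  rw [solve_alt_eq]
  unfold solve
  obtain ⟨hk, hpe⟩ := fair_pe vec 0 le_rfl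
  rw [loopA_eq, hpe]
  have : max (0 - (vec.reverse.foldl solveFairStep (0, 0)).2) 0 = 0 := by omega
  rw [this, add_zero]
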